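-- pv_equiv track=rewrite | github.com/CaseyJames669/Adv_Python | doc_base/word.py | word_lines
-- ===== SOURCE A (Python) =====
-- import string
--
-- def word_strip(wd):
--     '''Strip string and return lowercase version of result
--
--     Return a stripped, lowercase version of the word. A stripped word is one
--     that begins and ends with an alphabetic character and has no intervening
--     white space.  I.e. the input parameter has all non-alphabetic symbols
--     stripped away from its boundaries, but such symbols remaining in the
--     interior of a word.
--
--     Precondition: w is a string
--     Postcondition: returns 'stripped' string in lowercase
--     '''
--
--     # non-letter printable characters
--     clipper = ''.join([ch for ch in string.printable\
--                                     if ch not in string.ascii_letters])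
--     return wd.strip(clipper).lower()
--
-- def words(data=None):
--     '''Return an iterator over data that returns tuples of (line, word)
--
--     Preconditions:  'data' must be an iterable of strings
--     Postcondition:  returns an iterator over data that produces a tuple
--                     (i, w) where:
--                         w is the stripped lower-case representation of next
--                             word in data and
--                         i is the index of the item in data from which the
--                             word w was retrieved.
--                     A stripped word is one that begins and ends with an
--                     alphabetic character and has no intervening white space.
--     '''
--
--     # iterate over the numbered strings in data
--     for num, line in enumerate(data):
--         # iterate over the stripped words in the current string
--         for word in [word_strip(m_word) for m_word in line.split()]:
--             # ignore empty words
--             if word: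
--                 yield(num, word)
--
-- def word_lines(data):
--     '''Return a dict of {word:locations} of words in data
--
--     Precondition:  data must be an iterable of strings
--     Postcondition:  returns a dict of {word:locations} where
--                     word is a lower case representation of a word
--                     from data and locations is a list of indices
--                     from the data indicating each item in data that
--                     contains word.  Each index occurs only once in
--                     any given list.
--     '''
--
--     wd_line = dict()
--     # iterate over all stripped words in data and the line they are on
--     for line, word in words(data):
--         # if the word is already in the dict
--         if word in wd_line:
--             # if this line isn't in the line list for word, add it
--             if wd_line[word][-1] != line:
--                 wd_line[word].append(line)
--         # otherwise, add the word to the dict and add the line to its list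
--         else:
--             wd_line[word] = [line]
--     return wd_line
-- ===== SOURCE B (Python) =====
-- import string
--
-- def word_lines(data):
--     '''Return a dict of {word: list of line indices} of words in data.
--
--     Staged grouping: first flatten data into a list of (line, word) pairs,
--     then list the distinct words in first-appearance order, and finally
--     group: each word maps to the sorted distinct lines it occurs on.
--     '''
--     clipper = ''.join(ch for ch in string.printable if ch not in string.ascii_letters)
--     pairs = []
--     for num, line in enumerate(data):
--         for tok in line.split():
--             w = tok.strip(clipper).lower()
--             if w:
--                 pairs.append((num, w))
--     order = []
--     for _, w in pairs:
--         if w not in order: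
--             order.append(w)
--     return {w: sorted({n for n, x in pairs if x == w}) for w in order}
-- ===== Notes on version B (the rewrite author's own statement) =====
-- stated objective: alternative
-- what changed: B drops A's incremental dict with its order-dependent last-element dedup and instead works in three separate stages: flatten the input into a list of (line, word) pairs, collect the distinct words in first-appearance order, then build the result by grouping — for each word a scan of the pair list collecting its distinct lines, sorted; correct because A's dict keys are exactly the words in first-appearance order and A's per-word list is the distinct occurrence lines in (non-decreasing, hence sorted) order.
import Mathlib
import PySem

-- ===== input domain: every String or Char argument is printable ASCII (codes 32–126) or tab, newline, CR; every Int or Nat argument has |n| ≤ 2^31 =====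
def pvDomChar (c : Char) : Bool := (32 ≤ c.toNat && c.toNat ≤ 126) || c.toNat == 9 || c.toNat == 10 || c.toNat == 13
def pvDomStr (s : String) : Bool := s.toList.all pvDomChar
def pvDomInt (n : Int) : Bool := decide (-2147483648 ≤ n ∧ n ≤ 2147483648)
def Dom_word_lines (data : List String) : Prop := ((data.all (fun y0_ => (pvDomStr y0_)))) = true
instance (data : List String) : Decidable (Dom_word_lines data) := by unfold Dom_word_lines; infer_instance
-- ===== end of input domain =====

-- B replaces A's incremental dict with its order-dependent last-element dedup by three staged
-- passes: flatten to (line, word) pairs, list the distinct words in first-appearance order,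
-- then group each word to the sorted distinct lines it occurs on; equivalence proved for all inputs.

-- ===== PORT A =====
-- string.printable and string.ascii_letters
def pvPrintable : String := "0123456789abcdefghijklmnopqrstuvwxyzABCDEFGHIJKLMNOPQRSTUVWXYZ!\"#$%&'()*+,-./:;<=>?@[\\]^_`{|}~ \t\n\r\x0b\x0c"
def pvLetters : String := "abcdefghijklmnopqrstuvwxyzABCDEFGHIJKLMNOPQRSTUVWXYZ"

-- word_strip: clipper = ''.join([ch for ch in string.printable if ch not in string.ascii_letters]); wd.strip(clipper).lower()
def word_strip (wd : String) : String :=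
  PySem.Str.lower (PySem.Str.stripChars wd
    (String.ofList (pvPrintable.toList.filter (fun ch => !(pvLetters.toList.contains ch)))))

-- one line of the 'words' generator: the (num, word) pairs yielded for (num, line)
def pvWordsLine (p : Int × String) : List (Int × String) :=
  (((PySem.Str.split₀ p.2).map word_strip).filter (fun w => w ≠ "")).map (fun w => (p.1, w))

-- words(data): the whole stream of (num, word) pairs
def pvWords (data : List String) : List (Int × String) :=
  (PySem.List.enumerate data).flatMap pvWordsLine

-- the body of A's for-loop over words(data)
def pvStepA (d : PySem.Dict String (List Int)) (t : Int × String) : PySem.Dict String (List Int) :=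
  match d.get? t.2 with
  | some lst => if PySem.List.pyGet? lst (-1) ≠ some t.1 then d.insert t.2 (lst ++ [t.1]) else d
  | none => d.insert t.2 [t.1]

def word_lines (data : List String) : List (String × List Int) :=
  ((pvWords data).foldl pvStepA PySem.Dict.empty).items

-- ===== PORT B =====
def word_lines_alt (data : List String) : List (String × List Int) :=
  let clipper := String.ofList (pvPrintable.toList.filter (fun ch => !(pvLetters.toList.contains ch)))
  -- stage 1: pairs = [(num, w) for each cleaned non-empty word]
  let pairs : List (Int × String) :=
    (PySem.List.enumerate data).foldl (fun acc p =>
      (PySem.Str.split₀ p.2).foldl (fun acc tok =>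
        let w := PySem.Str.lower (PySem.Str.stripChars tok clipper)
        if w ≠ "" then acc ++ [(p.1, w)] else acc) acc) []
  -- stage 2: distinct words in first-appearance order
  let order : List String :=
    pairs.foldl (fun acc t => if acc.contains t.2 then acc else acc ++ [t.2]) []
  -- stage 3: group — for each word, the sorted set of its lines
  order.map (fun w =>
    (w, PySem.List.sorted (PySem.Set.ofList ((pairs.filter (fun q => q.2 == w)).map Prod.fst)) (fun x => x)))

-- ===== PRECONDITION & SPEC =====
def Spec_word_lines (data : List String) (out : List (String × List Int)) : Prop := out = word_lines_alt data
instance (data : List String) (out : List (String × List Int)) : Decidable (Spec_word_lines data out) := by unfold Spec_word_lines; infer_instance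

-- ===== CLAIM (what is proved, stated in full; the proofs are below) =====
def Claim_equal_word_lines : Prop := ∀ (data : List String), Dom_word_lines data → Spec_word_lines data (word_lines data)

-- ===== LEMMAS AND PROOFS =====

-- A's in-place dedup, as a step / fold over the line numbers of one word
def adjStep (acc : List Int) (n : Int) : List Int :=
  if acc.getLast? ≠ some n then acc ++ [n] else acc
def adjDedup (ns : List Int) : List Int := ns.foldl adjStep []

-- the line numbers on which word w occurs, in stream order
def linesOf (w : String) (ts : List (Int × String)) : List Int :=
  (ts.filter (fun q => q.2 == w)).map Prod.fst

-- xs[-1] is the last element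
theorem pyGet_neg_one (xs : List Int) : PySem.List.pyGet? xs (-1) = xs.getLast? := by
  simp only [PySem.List.pyGet?, PySem.List.pyIdx?]
  rcases xs with _ | ⟨a, t⟩
  · simp
  · simp [List.getLast?_eq_getElem?]

-- a strictly increasing nonempty list: its last element is a member and an upper bound
theorem last_max : ∀ (lst : List Int), lst.Pairwise (· < ·) → lst ≠ [] →
    ∃ m, lst.getLast? = some m ∧ m ∈ lst ∧ ∀ x ∈ lst, x ≤ m := by
  intro lst
  induction lst with
  | nil => intro _ h; exact absurd rfl h
  | cons a t ih =>
    intro hp _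
    rcases t with _ | ⟨b, t'⟩
    · exact ⟨a, rfl, by simp, by simp⟩
    · obtain ⟨m, hm1, hm2, hm3⟩ := ih (List.pairwise_cons.1 hp).2 (by simp)
      refine ⟨m, by rw [List.getLast?_cons_cons]; exact hm1, List.mem_cons_of_mem _ hm2, ?_⟩
      intro x hx
      rcases List.mem_cons.1 hx with rfl | hx'
      · exact le_of_lt ((List.pairwise_cons.1 hp).1 m hm2)
      · exact hm3 x hx'

-- on a non-decreasing stream, A's adjacent dedup computes exactly set(ns), already strictly increasing
theorem adj_eq_set_aux : ∀ (ns acc : List Int), ns.Pairwise (· ≤ ·) → acc.Pairwise (· < ·) →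
    (∀ x ∈ acc, ∀ n ∈ ns, x ≤ n) →
    ns.foldl adjStep acc = ns.foldl PySem.Set.add acc ∧
      (ns.foldl PySem.Set.add acc).Pairwise (· < ·) := by
  intro ns
  induction ns with
  | nil => intro acc _ hlt _; exact ⟨rfl, hlt⟩
  | cons n rest ih =>
    intro acc hmono hlt hb
    have hble : ∀ x ∈ acc, x ≤ n := fun x hx => hb x hx n List.mem_cons_self
    have hstep : adjStep acc n = PySem.Set.add acc n := by
      rcases heq : acc with _ | ⟨a, t⟩
      · simp [adjStep, PySem.Set.add]
      · rw [← heq]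
        have hne : acc ≠ [] := by rw [heq]; simp
        obtain ⟨m, hm1, hm2, hm3⟩ := last_max acc hlt hne
        by_cases hmn : m = n
        · have hmem : n ∈ acc := hmn ▸ hm2
          simp [adjStep, PySem.Set.add, hm1, hmn, hmem]
        · have hnm : n ∉ acc := fun hmem => hmn (le_antisymm (hble m hm2) (hm3 n hmem))
          simp [adjStep, PySem.Set.add, hm1, hmn, hnm]
    have hlt' : (PySem.Set.add acc n).Pairwise (· < ·) := by
      by_cases hmem : n ∈ acc
      · simp [PySem.Set.add, hmem, hlt]
      · have : ∀ x ∈ acc, x < n := fun x hx => lt_of_le_of_ne (hble x hx) (fun h => hmem (h ▸ hx))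
        simp only [PySem.Set.add]
        rw [if_neg (by simpa using hmem)]
        rw [List.pairwise_append]
        exact ⟨hlt, List.pairwise_singleton _ _, fun x hx y hy => by
          rw [List.mem_singleton.1 hy]; exact this x hx⟩
    have hb' : ∀ x ∈ PySem.Set.add acc n, ∀ k ∈ rest, x ≤ k := by
      intro x hx k hk
      rcases (PySem.Set.mem_add _ _ _).1 hx with hx' | rfl
      · exact hb x hx' k (List.mem_cons_of_mem _ hk)
      · exact (List.pairwise_cons.1 hmono).1 k hk
    obtain ⟨h1, h2⟩ := ih (PySem.Set.add acc n) (List.pairwise_cons.1 hmono).2 hlt' hb'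
    exact ⟨by simp only [List.foldl_cons, hstep, h1], h2⟩

theorem adj_eq_set (ns : List Int) (h : ns.Pairwise (· ≤ ·)) :
    adjDedup ns = PySem.Set.ofList ns ∧ (PySem.Set.ofList ns).Pairwise (· < ·) := by
  have := adj_eq_set_aux ns [] h List.Pairwise.nil (by simp)
  rwa [PySem.Set.ofList_eq_foldl]

-- appending one pair to the stream: effect on linesOf
theorem linesOf_append_singleton (w : String) (ts : List (Int × String)) (t : Int × String) :
    linesOf w (ts ++ [t]) = if t.2 = w then linesOf w ts ++ [t.1] else linesOf w ts := by
  simp only [linesOf, List.filter_append]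
  by_cases h : t.2 = w <;> simp [h]

theorem adjDedup_append_singleton (ns : List Int) (n : Int) :
    adjDedup (ns ++ [n]) = adjStep (adjDedup ns) n := by
  simp [adjDedup, List.foldl_append]

-- characterization of A's fold: items = distinct words in order, each with its adjacent-dedup line list
theorem itemsA : ∀ (ts : List (Int × String)),
    (ts.foldl pvStepA PySem.Dict.empty).items =
      (PySem.Set.ofList (ts.map Prod.snd)).map (fun w => (w, adjDedup (linesOf w ts))) := by
  intro ts
  induction ts using List.reverseRecOn with
  | nil => rfl
  | append_singleton ts t ih =>
    rw [List.foldl_append, List.foldl_cons, List.foldl_nil]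
    have hS : PySem.Set.ofList ((ts ++ [t]).map Prod.snd)
        = PySem.Set.add (PySem.Set.ofList (ts.map Prod.snd)) t.2 := by
      rw [List.map_append, PySem.Set.ofList_eq_foldl, List.foldl_append,
        ← PySem.Set.ofList_eq_foldl]
      rfl
    set S := PySem.Set.ofList (ts.map Prod.snd) with hSdef
    set D := ts.foldl pvStepA PySem.Dict.empty with hDdef
    have hkeys : D.keys = S := by
      simp only [PySem.Dict.keys, ih, List.map_map]
      simp [Function.comp_def]
    have hnd : D.keys.Nodup := by rw [hkeys]; exact PySem.Set.nodup_ofList _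
    by_cases h : t.2 ∈ S
    · have hadd : PySem.Set.add S t.2 = S := by
        simp [PySem.Set.add, h]
      have hmem : (t.2, adjDedup (linesOf t.2 ts)) ∈ D.items := by
        rw [ih]; exact List.mem_map.2 ⟨t.2, h, rfl⟩
      have hg : D.get? t.2 = some (adjDedup (linesOf t.2 ts)) :=
        PySem.Dict.get?_of_mem_items D hmem hnd
      rw [hS, hadd]
      unfold pvStepA
      rw [hg]
      simp only [pyGet_neg_one]
      by_cases hlast : (adjDedup (linesOf t.2 ts)).getLast? = some t.1
      · rw [if_neg (not_not_intro hlast)]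
        rw [ih]
        apply List.map_congr_left
        intro w hw
        rw [linesOf_append_singleton]
        by_cases hwt : t.2 = w
        · subst hwt
          rw [if_pos rfl, adjDedup_append_singleton]
          simp only [adjStep]
          rw [if_neg (not_not_intro hlast)]
        · rw [if_neg hwt]
      · rw [if_pos hlast]
        have hcont : D.contains t.2 = true := by
          rw [PySem.Dict.contains_eq_isSome_get?, hg]; rfl
        rw [PySem.Dict.items_insert_of_contains D _ hcont, ih, List.map_map]
        apply List.map_congr_left
        intro w hw
        simp only [Function.comp]
        rw [linesOf_append_singleton]
        by_cases hwt : t.2 = w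
        · subst hwt
          rw [if_pos rfl, adjDedup_append_singleton]
          simp only [adjStep]
          rw [if_pos hlast]
          simp
        · rw [if_neg hwt]
          simp [Ne.symm hwt]
    · have hadd : PySem.Set.add S t.2 = S ++ [t.2] := by
        simp [PySem.Set.add, h]
      have hg : D.get? t.2 = none := by
        rw [PySem.Dict.get?_eq_none_iff_not_mem_keys, hkeys]; exact h
      have hcont : D.contains t.2 = false := by
        rw [PySem.Dict.contains_eq_isSome_get?, hg]; rfl
      have hnotin : t.2 ∉ ts.map Prod.snd := fun hm => h ((PySem.Set.mem_ofList _ _).2 hm)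
      have hlinesnil : linesOf t.2 ts = [] := by
        simp only [linesOf, List.map_eq_nil_iff, List.filter_eq_nil_iff]
        intro q hq hqw
        exact hnotin (List.mem_map.2 ⟨q, hq, by simpa using hqw⟩)
      unfold pvStepA
      rw [hg]
      rw [PySem.Dict.items_insert_of_not_contains D [t.1] hcont, hS, hadd, List.map_append, ih]
      congr 1
      · apply List.map_congr_left
        intro w hw
        rw [linesOf_append_singleton, if_neg (fun hwt => h (by rw [hwt]; exact hw))]
      · simp only [List.map_cons, List.map_nil]
        rw [linesOf_append_singleton, if_pos rfl, hlinesnil]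
        rfl

-- the words stream has non-decreasing line numbers
theorem words_mono (data : List String) :
    (pvWords data).Pairwise (fun a b => a.1 ≤ b.1) := by
  unfold pvWords
  rw [List.pairwise_flatMap]
  constructor
  · intro p _
    rw [pvWordsLine, List.pairwise_map]
    induction (((PySem.Str.split₀ p.2).map word_strip).filter (fun w => w ≠ "")) with
    | nil => exact List.Pairwise.nil
    | cons a t ih => exact List.pairwise_cons.2 ⟨fun _ _ => le_refl _, ih⟩
  · refine (PySem.List.pairwise_lt_enumerate data 0).imp_of_mem ?_
    intro a b _ _ hab x hx y hy
    have hxa : x.1 = a.1 := by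
      unfold pvWordsLine at hx; obtain ⟨w, _, rfl⟩ := List.mem_map.1 hx; rfl
    have hyb : y.1 = b.1 := by
      unfold pvWordsLine at hy; obtain ⟨w, _, rfl⟩ := List.mem_map.1 hy; rfl
    rw [hxa, hyb]; exact le_of_lt hab

theorem linesOf_mono (w : String) (data : List String) :
    (linesOf w (pvWords data)).Pairwise (· ≤ ·) := by
  rw [linesOf, List.pairwise_map]
  exact ((words_mono data).sublist List.filter_sublist).imp (fun h => h)

-- B's stage-1 nested loops build exactly the words stream
theorem pairs_eq (data : List String) :
    (PySem.List.enumerate data).foldl (fun acc p =>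
      (PySem.Str.split₀ p.2).foldl (fun acc tok =>
        let w := PySem.Str.lower (PySem.Str.stripChars tok
          (String.ofList (pvPrintable.toList.filter (fun ch => !(pvLetters.toList.contains ch)))))
        if w ≠ "" then acc ++ [(p.1, w)] else acc) acc) []
    = pvWords data := by
  have hinner : ∀ (p : Int × String) (acc : List (Int × String)),
      (PySem.Str.split₀ p.2).foldl (fun acc tok =>
        let w := PySem.Str.lower (PySem.Str.stripChars tok
          (String.ofList (pvPrintable.toList.filter (fun ch => !(pvLetters.toList.contains ch)))))
        if w ≠ "" then acc ++ [(p.1, w)] else acc) acc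
      = acc ++ pvWordsLine p := by
    intro p acc
    rw [show (fun (acc : List (Int × String)) (tok : String) =>
        let w := PySem.Str.lower (PySem.Str.stripChars tok
          (String.ofList (pvPrintable.toList.filter (fun ch => !(pvLetters.toList.contains ch)))))
        if w ≠ "" then acc ++ [(p.1, w)] else acc)
      = (fun acc tok => if word_strip tok ≠ "" then acc ++ [(p.1, word_strip tok)] else acc)
      from rfl]
    rw [← List.foldl_map (f := word_strip)
      (g := fun acc w => if w ≠ "" then acc ++ [(p.1, w)] else acc)]
    rw [PySem.List.foldl_append_ite (p := fun w => w ≠ "") (f := fun w => (p.1, w))]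
    rfl
  rw [PySem.List.foldl_congr_mem _ _ _ _ (fun acc x _ => hinner x acc)]
  rw [PySem.List.foldl_append_eq_flatMap]
  rfl

-- ===== VERDICT (by name: the statement is the Claim_ definition above) =====
theorem word_lines_spec : Claim_equal_word_lines := by
  intro data _
  unfold Spec_word_lines word_lines word_lines_alt
  simp only [pairs_eq]
  rw [itemsA]
  have horder : (pvWords data).foldl
      (fun acc t => if acc.contains t.2 then acc else acc ++ [t.2]) []
      = PySem.Set.ofList ((pvWords data).map Prod.snd) := by
    rw [PySem.Set.ofList_eq_foldl, List.foldl_map]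
    rfl
  rw [horder]
  apply List.map_congr_left
  intro w _
  obtain ⟨h1, h2⟩ := adj_eq_set (linesOf w (pvWords data)) (linesOf_mono w data)
  rw [show ((pvWords data).filter (fun q => q.2 == w)).map Prod.fst = linesOf w (pvWords data) from rfl]
  rw [h1, PySem.List.sorted_eq_of_perm_of_pairwise_lt _ _ _ (List.Perm.refl _) h2]
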